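-- pv_equiv track=rewrite | github.com/iofu728/PAT-A-by-iofu728 | leetcode/1250.py | isGoodArray
-- ===== SOURCE A (Python) =====
-- from typing import List
--
-- def isGoodArray(nums: List[int]) -> bool:
--     def gcd(a: int, b: int):
--         if b == 0:
--             return a
--         return gcd(b, a % b)
--
--     res = nums[0]
--     for ii in nums[1:]:
--         res = gcd(res, ii)
--     return res == 1
-- ===== SOURCE B (Python) =====
-- from typing import List
--
-- def isGoodArray(nums: List[int]) -> bool:
--     # One fold from the gcd identity 0 with an inlined iterative Euclid loop:
--     # no recursion, no helper, no head/tail split.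
--     g = 0
--     for x in nums:
--         while x:
--             g, x = x, g % x
--     return g == 1
-- ===== Notes on version B (the rewrite author's own statement) =====
-- stated objective: simpler
-- what changed: Replaced the recursive gcd helper plus head/tail slicing with a single fold from the gcd identity 0 using an inlined iterative Euclid loop (no per-pair recursive calls, no slice copy).
-- crash fix: On the empty list A raises IndexError (nums[0]); B returns False (gcd of nothing is 0, which is not 1). — e.g. on isGoodArray([]): A raises IndexError, B returns false
import Mathlib
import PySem

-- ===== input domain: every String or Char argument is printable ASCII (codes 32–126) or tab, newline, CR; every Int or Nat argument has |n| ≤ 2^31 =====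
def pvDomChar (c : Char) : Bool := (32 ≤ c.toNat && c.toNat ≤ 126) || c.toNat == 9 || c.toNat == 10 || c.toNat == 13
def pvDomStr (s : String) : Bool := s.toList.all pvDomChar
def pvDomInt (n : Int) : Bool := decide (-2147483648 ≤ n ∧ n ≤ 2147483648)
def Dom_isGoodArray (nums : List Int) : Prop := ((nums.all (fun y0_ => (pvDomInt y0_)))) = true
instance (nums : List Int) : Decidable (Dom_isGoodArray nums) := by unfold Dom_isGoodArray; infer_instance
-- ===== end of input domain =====

-- B replaces A's recursive gcd helper and head/tail split by one fold from 0 with an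
-- inlined iterative Euclid loop (objective: simpler); A raises on [] (excluded by Pre_).

-- Termination measure for Python's a % b (sign of the divisor): |a % b| < |b| when b ≠ 0.
theorem pvModNatAbsLt (a b : Int) (hb : b ≠ 0) : (PySem.Int.mod a b).natAbs < b.natAbs := by
  rcases lt_or_gt_of_ne hb with h | h
  · have := PySem.Int.mod_neg_bounds (a := a) h
    omega
  · have h1 := PySem.Int.mod_nonneg (a := a) h
    have h2 := PySem.Int.mod_lt (a := a) h
    omega

-- ===== PORT A =====
-- A's inner recursive helper gcd(a, b)
def pyGcdA (a b : Int) : Int :=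
  if b = 0 then a
  else pyGcdA b (PySem.Int.mod a b)
termination_by b.natAbs
decreasing_by exact pvModNatAbsLt a b (by assumption)

def isGoodArray (nums : List Int) : Bool :=
  match PySem.List.pyGet? nums 0 with
  | none => false  -- Python: IndexError on nums[0]; excluded by Pre_
  | some r0 =>
    (PySem.List.slice nums (some 1) none).foldl (fun res ii => pyGcdA res ii) r0 == 1

-- ===== PORT B =====
-- B's inner 'while x: g, x = x, g % x' loop
def euclidLoopB (g x : Int) : Int :=
  if x = 0 then g
  else euclidLoopB x (PySem.Int.mod g x)
termination_by x.natAbs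
decreasing_by exact pvModNatAbsLt g x (by assumption)

def isGoodArray_alt (nums : List Int) : Bool :=
  nums.foldl euclidLoopB 0 == 1

-- ===== PRECONDITION & SPEC =====
-- A raises IndexError on the empty list (nums[0]); nothing else raises.
def Pre_isGoodArray (nums : List Int) : Prop := nums ≠ []
instance (nums : List Int) : Decidable (Pre_isGoodArray nums) := by unfold Pre_isGoodArray; infer_instance
def pvWitness_isGoodArray : List Int := [4, 6, 9]

-- On the empty list A raises IndexError (nums[0]); B returns False.
def Raises_isGoodArray (nums : List Int) : Prop := nums = []
instance (nums : List Int) : Decidable (Raises_isGoodArray nums) := by unfold Raises_isGoodArray; infer_instance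
def pvRaiseWitness_isGoodArray : List Int := []
def pvRaiseWitnessOut_isGoodArray : Bool := false

def Spec_isGoodArray (nums : List Int) (out : Bool) : Prop := out = isGoodArray_alt nums
instance (nums : List Int) (out : Bool) : Decidable (Spec_isGoodArray nums out) := by unfold Spec_isGoodArray; infer_instance

-- ===== CLAIM (what is proved, stated in full; the proofs are below) =====
def Claim_equal_isGoodArray : Prop := ∀ (nums : List Int), Dom_isGoodArray nums → Pre_isGoodArray nums → Spec_isGoodArray nums (isGoodArray nums)
def Claim_raises_isGoodArray : Prop := (∀ (nums : List Int), Dom_isGoodArray nums → Raises_isGoodArray nums → ¬ Pre_isGoodArray nums) ∧ (Dom_isGoodArray (pvRaiseWitness_isGoodArray) ∧ Raises_isGoodArray (pvRaiseWitness_isGoodArray) ∧ isGoodArray_alt (pvRaiseWitness_isGoodArray) = pvRaiseWitnessOut_isGoodArray)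

-- ===== LEMMAS AND PROOFS =====

-- A's recursive gcd and B's iterative Euclid loop compute the same function.
theorem gcdA_eq_euclidLoopB (a b : Int) : pyGcdA a b = euclidLoopB a b := by
  fun_induction pyGcdA a b <;> rw [euclidLoopB] <;> simp_all

theorem mod_zero_left (h : Int) : PySem.Int.mod 0 h = 0 :=
  (PySem.Int.mod_eq_zero_iff_dvd 0 h).mpr (dvd_zero h)

theorem euclid_zero (h : Int) : euclidLoopB 0 h = h := by
  by_cases hh : h = 0
  · rw [euclidLoopB, if_pos hh, hh]
  · rw [euclidLoopB, if_neg hh, mod_zero_left, euclidLoopB, if_pos rfl]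

-- ===== VERDICT (by name: the statement is the Claim_ definition above) =====
theorem isGoodArray_spec : Claim_equal_isGoodArray := by
  intro nums _ hpre
  cases nums with
  | nil => exact absurd rfl hpre
  | cons h t =>
    unfold Spec_isGoodArray isGoodArray isGoodArray_alt
    simp only [PySem.List.pyGet?, PySem.List.pyIdx?, PySem.List.slice_from_one]
    have hfun : (fun res ii => pyGcdA res ii) = euclidLoopB :=
      funext fun a => funext fun b => gcdA_eq_euclidLoopB a b
    simp [hfun, List.foldl_cons, euclid_zero]

@[simp] theorem isGoodArray_raises : Claim_raises_isGoodArray := by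
  unfold Claim_raises_isGoodArray
  exact ⟨fun nums _ hr hp => hp hr, by decide⟩
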